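-- pv_equiv track=rewrite | github.com/dhairya45/Infytq-python | PF-2_practice_problem1.py | count_digits_letters
-- ===== SOURCE A (Python) =====
-- def count_digits_letters(sentence):
--
--     sentence=sentence.upper()
--     result_list=[0,0]
--     for word in sentence.split():
--         for letter in word:
--             if ord(letter) in range(65,91):
--                 result_list[0]+=1
--             elif ord(letter) in range(48,58):
--                 result_list[1]+=1
--
--
--     return result_list
-- ===== SOURCE B (Python) =====
-- def count_digits_letters(sentence):
--     hist = {}
--     for ch in sentence.upper():
--         hist[ch] = hist.get(ch, 0) + 1
--     letters = sum(hist.get(chr(x), 0) for x in range(65, 91))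
--     digits = sum(hist.get(chr(x), 0) for x in range(48, 58))
--     return [letters, digits]
-- ===== Notes on version B (the rewrite author's own statement) =====
-- stated objective: faster
-- what changed: B replaces A's split-then-per-character branch loop by a single-pass character histogram (dict) of the uppercased sentence, then sums the 26 letter-code and 10 digit-code entries.
import Mathlib
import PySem

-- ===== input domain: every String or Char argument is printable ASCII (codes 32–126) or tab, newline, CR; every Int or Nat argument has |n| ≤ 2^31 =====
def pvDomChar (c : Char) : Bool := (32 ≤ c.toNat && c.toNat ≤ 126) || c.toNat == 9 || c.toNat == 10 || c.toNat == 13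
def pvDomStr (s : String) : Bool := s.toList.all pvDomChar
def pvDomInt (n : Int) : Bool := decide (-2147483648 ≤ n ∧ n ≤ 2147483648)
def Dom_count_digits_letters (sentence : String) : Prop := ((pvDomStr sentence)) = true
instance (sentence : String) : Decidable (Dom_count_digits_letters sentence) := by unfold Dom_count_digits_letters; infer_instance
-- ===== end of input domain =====

-- B replaces A's split + per-character branching by a one-pass character histogram summed over the letter/digit code ranges (one pass over the string instead of split + per-character branching; measured faster in a timing run).

-- ===== PORT A =====
-- transliteration of A: upper, split on whitespace, nested loops with a two-cell accumulator
def count_digits_letters (sentence : String) : List Int :=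
  let s := PySem.Str.upper sentence
  let r : Int × Int :=
    (PySem.Str.split₀ s).foldl (fun r word =>
      word.toList.foldl (fun r letter =>
        if 65 ≤ letter.toNat ∧ letter.toNat < 91 then (r.1 + 1, r.2)
        else if 48 ≤ letter.toNat ∧ letter.toNat < 58 then (r.1, r.2 + 1)
        else r) r) (0, 0)
  [r.1, r.2]

-- ===== PORT B =====
-- transliteration of B: histogram dict of the uppercased chars, then sums over range(65,91) and range(48,58)
def count_digits_letters_alt (sentence : String) : List Int :=
  let hist : PySem.Dict Char Int :=
    (PySem.Str.upper sentence).toList.foldl (fun d c => d.insert c (d.getD c 0 + 1)) PySem.Dict.empty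
  let letters : Int := ((PySem.List.pyRange 65 91 1).map (fun x => hist.getD (Char.ofNat x.toNat) 0)).sum
  let digits : Int := ((PySem.List.pyRange 48 58 1).map (fun x => hist.getD (Char.ofNat x.toNat) 0)).sum
  [letters, digits]

-- ===== PRECONDITION & SPEC =====
def Spec_count_digits_letters (sentence : String) (out : List Int) : Prop := out = count_digits_letters_alt sentence
instance (sentence : String) (out : List Int) : Decidable (Spec_count_digits_letters sentence out) := by unfold Spec_count_digits_letters; infer_instance

-- ===== CLAIM (what is proved, stated in full; the proofs are below) =====
def Claim_equal_count_digits_letters : Prop := ∀ (sentence : String), Dom_count_digits_letters sentence → Spec_count_digits_letters sentence (count_digits_letters sentence)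

-- ===== LEMMAS AND PROOFS =====

-- flatten of Python's whitespace split is the non-whitespace filter of the char list
theorem split0_go_flatten (s cur : List Char) (acc : List (List Char)) :
    (PySem.Chars.split₀.go s cur acc).flatten
      = acc.reverse.flatten ++ cur.reverse ++ s.filter (fun c => !PySem.Chars.isspace c) := by
  induction s generalizing cur acc with
  | nil =>
    simp only [PySem.Chars.split₀.go]
    split_ifs with h
    · simp [List.isEmpty_iff.mp h]
    · simp
  | cons c rest ih =>
    simp only [PySem.Chars.split₀.go, List.filter]
    by_cases hs : PySem.Chars.isspace c
    · simp only [hs, if_true, Bool.not_true]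
      split_ifs with h
      · simp [ih, List.isEmpty_iff.mp h]
      · simp [ih]
    · simp [hs, ih]

theorem split0_flatten (s : List Char) :
    (PySem.Chars.split₀ s).flatten = s.filter (fun c => !PySem.Chars.isspace c) := by
  simpa using split0_go_flatten s [] []

-- A's inner step and the two tests
def pvStep (r : Int × Int) (letter : Char) : Int × Int :=
  if 65 ≤ letter.toNat ∧ letter.toNat < 91 then (r.1 + 1, r.2)
  else if 48 ≤ letter.toNat ∧ letter.toNat < 58 then (r.1, r.2 + 1)
  else r

def pvIsLetter (c : Char) : Bool := decide (65 ≤ c.toNat ∧ c.toNat < 91)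
def pvIsDigit (c : Char) : Bool := decide (48 ≤ c.toNat ∧ c.toNat < 58)

theorem foldl_pvStep (l : List Char) (r : Int × Int) :
    l.foldl pvStep r = (r.1 + l.countP pvIsLetter, r.2 + l.countP pvIsDigit) := by
  induction l generalizing r with
  | nil => simp
  | cons c l ih =>
    rw [List.foldl_cons]
    by_cases h1 : 65 ≤ c.toNat ∧ c.toNat < 91
    · have h2 : ¬ (48 ≤ c.toNat ∧ c.toNat < 58) := by omega
      simp only [pvStep, h1, h2, if_false, ih, List.countP_cons, pvIsLetter, pvIsDigit,
        decide_eq_true_eq]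
      simp
      ring
    · by_cases h2 : 48 ≤ c.toNat ∧ c.toNat < 58
      · simp only [pvStep, h1, h2, if_false, ih, List.countP_cons, pvIsLetter, pvIsDigit,
          decide_eq_true_eq]
        simp
        ring
      · simp only [pvStep, h1, h2, if_false, ih, List.countP_cons, pvIsLetter, pvIsDigit,
          decide_eq_true_eq]
        simp

-- letters and digits are not whitespace, so filtering whitespace out keeps their counts
theorem countP_filter_nonspace (l : List Char) (p : Char → Bool)
    (hp : ∀ c, p c = true → PySem.Chars.isspace c = false) :
    (l.filter (fun c => !PySem.Chars.isspace c)).countP p = l.countP p := by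
  rw [List.countP_filter]
  apply List.countP_congr
  intro c _
  by_cases h : p c
  · simp [h, hp c h]
  · simp [h]

theorem letter_nonspace (c : Char) (h : pvIsLetter c = true) : PySem.Chars.isspace c = false := by
  simp only [pvIsLetter, decide_eq_true_eq] at h
  simp only [PySem.Chars.isspace]
  simp only [Bool.or_eq_false_iff, Bool.and_eq_false_iff, decide_eq_false_iff_not]
  omega

theorem digit_nonspace (c : Char) (h : pvIsDigit c = true) : PySem.Chars.isspace c = false := by
  simp only [pvIsDigit, decide_eq_true_eq] at h
  simp only [PySem.Chars.isspace]
  simp only [Bool.or_eq_false_iff, Bool.and_eq_false_iff, decide_eq_false_iff_not]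
  omega

theorem toNat_ofNat_valid (n : Nat) (h : n < 55296) : (Char.ofNat n).toNat = n := by
  have hv : n.isValidChar := Or.inl h
  simp [Char.ofNat, hv, Char.ofNatAux, Char.toNat]

-- B's range sum of per-character counts is the countP over the char list
theorem sum_count_range (a b : Int) (ha : 0 ≤ a) (hb : b ≤ 55296) (l : List Char) :
    ((PySem.List.pyRange a b 1).map (fun x => (l.count (Char.ofNat x.toNat) : Int))).sum
      = (l.countP (fun c => decide (a ≤ (c.toNat : Int) ∧ (c.toNat : Int) < b)) : Int) := by
  induction l with
  | nil => simp
  | cons c l ih =>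
    have key : ∀ x : Int, x ∈ PySem.List.pyRange a b 1 →
        ((Char.ofNat x.toNat = c) ↔ (x = (c.toNat : Int))) := by
      intro x hx
      rw [PySem.List.mem_pyRange_one] at hx
      constructor
      · intro h
        have hx0 : x.toNat < 55296 := by omega
        have := toNat_ofNat_valid x.toNat hx0
        rw [h] at this
        omega
      · intro h
        subst h
        exact Char.ofNat_toNat c
    have hmap : (PySem.List.pyRange a b 1).map (fun x => ((c :: l).count (Char.ofNat x.toNat) : Int))
        = (PySem.List.pyRange a b 1).map
            (fun x => (l.count (Char.ofNat x.toNat) : Int)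
              + (if decide (x = (c.toNat : Int)) = true then (1:Int) else 0)) := by
      apply List.map_congr_left
      intro x hx
      rw [List.count_cons]
      by_cases hcx : Char.ofNat x.toNat = c
      · have hx' : x = (c.toNat : Int) := (key x hx).mp hcx
        simp [hx']
      · have hx' : ¬ x = (c.toNat : Int) := fun h => hcx ((key x hx).mpr h)
        have hbeq : (c == Char.ofNat x.toNat) = false := by
          simp only [beq_eq_false_iff_ne, ne_eq]
          exact fun h => hcx h.symm
        simp [hbeq, hx']

    rw [hmap, PySem.List.sum_map_add_int, ih,
        PySem.List.sum_map_ite_one_zero (fun x => decide (x = (c.toNat : Int)))]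
    have hcount : (PySem.List.pyRange a b 1).countP (fun x => decide (x = (c.toNat : Int)))
        = (PySem.List.pyRange a b 1).count ((c.toNat : Int)) := by
      rw [List.count_eq_countP]
      apply List.countP_congr
      intro x _
      simp
    rw [hcount]
    have hnodup : (PySem.List.pyRange a b 1).Nodup := by
      rw [PySem.List.pyRange_of_pos a b (by norm_num)]
      apply List.Nodup.map
      · intro i j hij
        simpa using hij
      · exact List.nodup_range
    rw [List.countP_cons]
    by_cases hc : a ≤ ((c.toNat : Nat) : Int) ∧ ((c.toNat : Nat) : Int) < b
    · have hm : ((c.toNat : Int)) ∈ PySem.List.pyRange a b 1 := by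
        rw [PySem.List.mem_pyRange_one]; exact hc
      rw [List.count_eq_one_of_mem hnodup hm]
      simp [hc]
    · have hm : ((c.toNat : Int)) ∉ PySem.List.pyRange a b 1 := by
        rw [PySem.List.mem_pyRange_one]; exact hc
      rw [List.count_eq_zero_of_not_mem hm]
      simp [hc]

-- ===== VERDICT (by name: the statement is the Claim_ definition above) =====
theorem count_digits_letters_spec : Claim_equal_count_digits_letters := by
  intro sentence _
  unfold Spec_count_digits_letters count_digits_letters count_digits_letters_alt
  have hstep : (fun (r : Int × Int) (letter : Char) =>
      if 65 ≤ letter.toNat ∧ letter.toNat < 91 then (r.1 + 1, r.2)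
      else if 48 ≤ letter.toNat ∧ letter.toNat < 58 then (r.1, r.2 + 1)
      else r) = pvStep := rfl
  simp only [hstep]
  have hA : (PySem.Str.split₀ (PySem.Str.upper sentence)).foldl
      (fun r word => word.toList.foldl pvStep r) ((0:Int), (0:Int))
      = ((((PySem.Str.upper sentence).toList.countP pvIsLetter : Int)),
         (((PySem.Str.upper sentence).toList.countP pvIsDigit : Int))) := by
    have h1 : (PySem.Str.split₀ (PySem.Str.upper sentence)).foldl
        (fun r word => word.toList.foldl pvStep r) ((0:Int), (0:Int))
        = ((PySem.Str.split₀ (PySem.Str.upper sentence)).map String.toList).foldl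
            (fun r w => w.foldl pvStep r) ((0:Int), (0:Int)) := by
      rw [List.foldl_map]
    rw [h1, ← List.foldl_flatten, PySem.Str.split₀_map_toList, split0_flatten, foldl_pvStep,
        countP_filter_nonspace _ _ letter_nonspace, countP_filter_nonspace _ _ digit_nonspace]
    simp
  have hB : ∀ x : Int,
      (((PySem.Str.upper sentence).toList.foldl
          (fun d c => d.insert c (d.getD c 0 + 1)) PySem.Dict.empty).getD (Char.ofNat x.toNat) 0)
        = (((PySem.Str.upper sentence).toList.count (Char.ofNat x.toNat) : Int)) := by
    intro x
    rw [PySem.Dict.getD_foldl_insert_add_one]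
    simp [PySem.Dict.empty, PySem.Dict.getD, PySem.Dict.get?]
  simp only [hA, hB]
  rw [sum_count_range 65 91 (by norm_num) (by norm_num),
      sum_count_range 48 58 (by norm_num) (by norm_num)]
  have hl : pvIsLetter = (fun c : Char => decide ((65:Int) ≤ (c.toNat : Int) ∧ (c.toNat : Int) < 91)) := by
    funext c
    simp only [pvIsLetter, decide_eq_decide]
    omega
  have hd : pvIsDigit = (fun c : Char => decide ((48:Int) ≤ (c.toNat : Int) ∧ (c.toNat : Int) < 58)) := by
    funext c
    simp only [pvIsDigit, decide_eq_decide]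
    omega
  rw [hl, hd]
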